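-- pv_equiv track=rewrite | github.com/saintifly/leetcode | 序列找上升中值.py | get_up_point
-- ===== SOURCE A (Python) =====
-- def get_up_point(input_list=[]):
--     '''
--     从列表中获取左边都是比它小的点，右边都是比它大的点
--     :param input_list:
--     :return:
--     '''
--     point_result = []
--     input_list_sort = sorted(input_list)
--     max_before = input_list[0]
--     del_elemnt =[]
--     for i in range(len(input_list)):
--         if i==0:
--             continue
--         for j in point_result:
--             if input_list[i]<=j :
--                 del_elemnt.append(j)
--         point_result = [x for x in point_result if x not in del_elemnt]
--         del_elemnt = []
--         if input_list[i] > max_before: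
--             point_result.append(input_list[i])
--             max_before = input_list[i]
--
--
--     return point_result
-- ===== SOURCE B (Python) =====
-- def get_up_point(input_list=[]):
--     # backward pass: flag elements strictly smaller than everything to their right
--     flags = []
--     smin = None
--     for x in reversed(input_list):
--         ok = smin is None or x < smin
--         flags.append(ok)
--         if ok:
--             smin = x
--     flags.reverse()
--     # forward pass: keep flagged elements strictly greater than the running max of earlier elements
--     result = []
--     pmax = None
--     for x, ok in zip(input_list, flags):
--         if ok and pmax is not None and pmax < x:
--             result.append(x)
--         if pmax is None or pmax < x:
--             pmax = x
--     return result
-- ===== Notes on version B (the rewrite author's own statement) =====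
-- stated objective: faster
-- what changed: A keeps a candidate list and rescans/prunes it inside the main loop (quadratic); B makes one backward pass computing suffix-min flags and one forward pass with a running prefix max, never revisiting candidates.
import Mathlib
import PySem

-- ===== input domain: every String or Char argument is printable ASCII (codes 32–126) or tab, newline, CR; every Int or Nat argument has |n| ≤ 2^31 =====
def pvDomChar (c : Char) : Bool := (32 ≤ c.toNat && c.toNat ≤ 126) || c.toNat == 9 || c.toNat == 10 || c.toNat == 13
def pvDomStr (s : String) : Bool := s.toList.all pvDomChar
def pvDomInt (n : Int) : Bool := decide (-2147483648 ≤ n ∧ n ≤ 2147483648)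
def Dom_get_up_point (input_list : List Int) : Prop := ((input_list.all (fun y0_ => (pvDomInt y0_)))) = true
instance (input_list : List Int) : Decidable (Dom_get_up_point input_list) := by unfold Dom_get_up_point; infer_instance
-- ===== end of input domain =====

-- B replaces A's quadratic candidate-list pruning by two linear passes (suffix-min flags, then a
-- running prefix max); A raises IndexError on [] (excluded by Pre_), where B returns [].

-- ===== PORT A =====
-- one body of A's for-loop: build del_elemnt, prune point_result, maybe append input_list[i]
def aStep (input_list : List Int) (st : List Int × Int) (i : Int) : List Int × Int :=
  if i == 0 then st
  else
    let xi := PySem.List.pyGetD input_list i 0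
    let del_elemnt := st.1.foldl (fun d j => if xi ≤ j then d ++ [j] else d) ([] : List Int)
    let pr := st.1.filter (fun x => !(del_elemnt.contains x))
    if st.2 < xi then (pr ++ [xi], xi) else (pr, st.2)

def get_up_point (input_list : List Int) : List Int :=
  let point_result : List Int := []
  let _input_list_sort := PySem.List.sorted input_list (fun x => x) false
  let max_before := PySem.List.pyGetD input_list 0 0
  ((PySem.List.pyRange 0 (input_list.length : Int) 1).foldl (aStep input_list)
    (point_result, max_before)).1

-- ===== PORT B =====
-- backward pass: append the flag 'strictly below the current suffix min', update the suffix min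
def bBackStep (st : List Bool × Option Int) (x : Int) : List Bool × Option Int :=
  let ok := match st.2 with | none => true | some m => decide (x < m)
  (st.1 ++ [ok], if ok then some x else st.2)

-- forward pass: keep flagged elements above the running prefix max, update the prefix max
def bFwdStep (st : List Int × Option Int) (p : Int × Bool) : List Int × Option Int :=
  let res := if p.2 && (match st.2 with | none => false | some m => decide (m < p.1)) then
               st.1 ++ [p.1] else st.1
  let pmax := match st.2 with
              | none => some p.1
              | some m => if m < p.1 then some p.1 else some m
  (res, pmax)

def get_up_point_alt (input_list : List Int) : List Int :=
  let flags := ((input_list.reverse.foldl bBackStep ([], none)).1).reverse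
  ((input_list.zip flags).foldl bFwdStep ([], none)).1

-- ===== PRECONDITION & SPEC =====
-- Pre_ excludes only the empty list, on which A raises IndexError (it reads input_list[0]).
def Pre_get_up_point (input_list : List Int) : Prop := input_list ≠ []
instance (input_list : List Int) : Decidable (Pre_get_up_point input_list) := by
  unfold Pre_get_up_point; infer_instance
def pvWitness_get_up_point : List Int := [1, 3, 2, 5]

def Spec_get_up_point (input_list : List Int) (out : List Int) : Prop :=
  out = get_up_point_alt input_list
instance (input_list : List Int) (out : List Int) : Decidable (Spec_get_up_point input_list out) := by
  unfold Spec_get_up_point; infer_instance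

-- ===== CLAIM (what is proved, stated in full; the proofs are below) =====
def Claim_equal_get_up_point : Prop := ∀ (input_list : List Int), Dom_get_up_point input_list →
  Pre_get_up_point input_list → Spec_get_up_point input_list (get_up_point input_list)

-- ===== LEMMAS AND PROOFS =====

-- common reference function: the "up points" of t, given running max mb of the elements before t
def gUp (mb : Int) : List Int → List Int
  | [] => []
  | x :: t => (if mb < x ∧ t.all (fun y => decide (x < y)) then [x] else [])
              ++ gUp (if mb < x then x else mb) t

-- A's loop body, expressed on the element value, with the prune collapsed to a single filter
def aF (st : List Int × Int) (x : Int) : List Int × Int :=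
  let pr := st.1.filter (fun j => decide (j < x))
  if st.2 < x then (pr ++ [x], x) else (pr, st.2)

theorem aStep_eq_aF (l : List Int) (st : List Int × Int) (i : Int) (hi : i ≠ 0) :
    aStep l st i = aF st (PySem.List.pyGetD l i 0) := by
  unfold aStep aF
  have h0 : (i == 0) = false := by simpa using hi
  rw [h0]
  simp only [Bool.false_eq_true, if_false]
  have hdel : st.1.foldl (fun d j => if PySem.List.pyGetD l i 0 ≤ j then d ++ [j] else d)
      ([] : List Int) = st.1.filter (fun j => decide (PySem.List.pyGetD l i 0 ≤ j)) := by
    simpa using PySem.List.foldl_append_ite_eq_filter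
      (l := st.1) (p := fun j => PySem.List.pyGetD l i 0 ≤ j) (acc := [])
  rw [hdel]
  have hfil : st.1.filter
      (fun x => !((st.1.filter (fun j => decide (PySem.List.pyGetD l i 0 ≤ j))).contains x))
      = st.1.filter (fun j => decide (j < PySem.List.pyGetD l i 0)) := by
    apply List.filter_congr
    intro y hy
    simp [List.mem_filter, hy]
    by_cases h : PySem.List.pyGetD l i 0 ≤ y
    · simp [h, show ¬ y < PySem.List.pyGetD l i 0 by omega]
    · simp [h, show y < PySem.List.pyGetD l i 0 by omega]
  rw [hfil]

theorem aGo (l : List Int) : ∀ (pr : List Int) (mb : Int),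
    (l.foldl aF (pr, mb)).1
      = pr.filter (fun j => l.all (fun y => decide (j < y))) ++ gUp mb l := by
  induction l with
  | nil => intro pr mb; simp [gUp]
  | cons x t ih =>
    intro pr mb
    rw [List.foldl_cons]
    by_cases hmb : mb < x
    · have hstep : aF (pr, mb) x = (pr.filter (fun j => decide (j < x)) ++ [x], x) := by
        simp [aF, hmb]
      rw [hstep, ih]
      simp only [gUp, List.all_cons, List.filter_append, List.filter_filter]
      by_cases hall : t.all (fun y => decide (x < y)) = true
      · simp [hall, hmb]
        exact List.filter_congr (fun a _ => by rw [Bool.and_comm])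
      · simp [hall, hmb]
        exact List.filter_congr (fun a _ => by rw [Bool.and_comm])
    · have hstep : aF (pr, mb) x = (pr.filter (fun j => decide (j < x)), mb) := by
        simp [aF, hmb]
      rw [hstep, ih]
      simp only [gUp, hmb, false_and, if_false, List.nil_append]
      rw [List.filter_filter]
      congr 1
      apply List.filter_congr
      intro a _; simp [Bool.and_comm]

-- A on x :: t computes gUp x t
theorem a_eq_gUp (x : Int) (t : List Int) : get_up_point (x :: t) = gUp x t := by
  simp only [get_up_point]
  have hlen : (0 : Int) < ((x :: t).length : Int) := by simp
  rw [PySem.List.pyRange_one_cons hlen, List.foldl_cons]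
  have h0 : aStep (x :: t) ([], PySem.List.pyGetD (x :: t) 0 0) 0
      = ([], PySem.List.pyGetD (x :: t) 0 0) := by
    unfold aStep; simp
  rw [h0]
  have hcongr : ∀ init : List Int × Int,
      (PySem.List.pyRange (0+1) ((x :: t).length : Int) 1).foldl (aStep (x :: t)) init
      = (PySem.List.pyRange (0+1) ((x :: t).length : Int) 1).foldl
          (fun st i => aF st (PySem.List.pyGetD (x :: t) i 0)) init := by
    intro init
    apply PySem.List.foldl_congr_mem
    intro acc i hi
    have h1 : 1 ≤ i := by
      have := (PySem.List.mem_pyRange_one.mp hi).1; omega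
    exact aStep_eq_aF _ _ _ (by omega)
  rw [hcongr]
  simp only [show (0:Int)+1 = 1 from rfl]
  rw [PySem.List.foldl_pyRange_pyGetD' (xs := x :: t) (a := 1) (d := 0) (f := aF)
        (init := ([], PySem.List.pyGetD (x :: t) 0 0)) (by omega)]
  simp only [show ((1:Int)).toNat = 1 from rfl, List.drop_succ_cons, List.drop_zero]
  rw [aGo]
  simp [PySem.List.pyGetD_zero_cons]

-- flag test against the current suffix minimum
def okOf (o : Option Int) (z : Int) : Bool :=
  match o with | none => true | some m => decide (z < m)

-- the flag list B's backward pass computes, written in forward order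
def fb : List Int → List Bool
  | [] => []
  | x :: t => (t.all (fun y => decide (x < y))) :: fb t

theorem back_spec (l : List Int) :
    (l.reverse.foldl bBackStep ([], none)).1 = (fb l).reverse ∧
    ∀ z, okOf ((l.reverse.foldl bBackStep ([], none)).2) z
        = l.all (fun y => decide (z < y)) := by
  induction l with
  | nil => constructor <;> simp [fb, okOf]
  | cons x t ih =>
    obtain ⟨ih1, ih2⟩ := ih
    have hrev : (x :: t).reverse = t.reverse ++ [x] := by simp
    rw [hrev, List.foldl_append, List.foldl_cons, List.foldl_nil]
    have hb : bBackStep (t.reverse.foldl bBackStep ([], none)) x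
        = ((t.reverse.foldl bBackStep ([], none)).1
             ++ [okOf (t.reverse.foldl bBackStep ([], none)).2 x],
           if okOf (t.reverse.foldl bBackStep ([], none)).2 x then some x
           else (t.reverse.foldl bBackStep ([], none)).2) := by
      simp [bBackStep, okOf]
    rw [hb]
    constructor
    · show (t.reverse.foldl bBackStep ([], none)).1 ++ [_] = _
      rw [ih1, ih2 x]
      simp [fb]
    · intro z
      rcases hm : (t.reverse.foldl bBackStep ([], none)).2 with _ | m
      · have hx := ih2 x; rw [hm] at hx
        have hz := ih2 z; rw [hm] at hz
        simp only [okOf] at hx hz ⊢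
        simp at hx hz ⊢
        intro h y hy; exact lt_trans h (hx y hy)
      · have hx := ih2 x; rw [hm] at hx
        have hz := ih2 z; rw [hm] at hz
        simp only [okOf] at hx hz ⊢
        by_cases hxm : x < m
        · simp only [decide_eq_true hxm, if_true]
          have hall : ∀ y ∈ t, x < y := by simpa [hxm] using hx.symm
          simp at hz ⊢
          intro h y hy; exact lt_trans h (hall y hy)
        · have hdx : (decide (x < m)) = false := by simpa using hxm
          simp only [okOf, hdx, Bool.false_eq_true, if_false]
          simp only [List.all_cons, ← hz]
          by_cases hzm : z < m
          · simp [hzm, show z < x by omega]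
          · simp [hzm]

theorem fwd_spec (t : List Int) : ∀ (res : List Int) (mb : Int),
    ((t.zip (fb t)).foldl bFwdStep (res, some mb)).1 = res ++ gUp mb t := by
  induction t with
  | nil => intro res mb; simp [fb, gUp]
  | cons x t ih =>
    intro res mb
    show ((t.zip (fb t)).foldl bFwdStep (bFwdStep (res, some mb) (x, _))).1 = _
    by_cases hmb : mb < x
    · by_cases hall : t.all (fun y => decide (x < y)) = true
      · have hstep : bFwdStep (res, some mb) (x, t.all (fun y => decide (x < y)))
            = (res ++ [x], some x) := by
          simp [bFwdStep, hall, hmb]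
        rw [hstep, ih]
        simp [gUp, hmb, hall]
      · have hstep : bFwdStep (res, some mb) (x, t.all (fun y => decide (x < y)))
            = (res, some x) := by
          simp [bFwdStep, hall, hmb]
        rw [hstep, ih]
        have hc : ¬ (mb < x ∧ t.all (fun y => decide (x < y)) = true) := fun h => hall h.2
        simp [gUp, hmb, hc]
        simpa using hall
    · have hstep : bFwdStep (res, some mb) (x, t.all (fun y => decide (x < y)))
          = (res, some mb) := by
        simp [bFwdStep, hmb]
      rw [hstep, ih]
      have hc : ¬ (mb < x ∧ t.all (fun y => decide (x < y)) = true) := fun h => hmb h.1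
      simp [gUp, hmb, hc]

-- B on x :: t also computes gUp x t
theorem b_eq_gUp (x : Int) (t : List Int) : get_up_point_alt (x :: t) = gUp x t := by
  simp only [get_up_point_alt]
  rw [(back_spec (x :: t)).1, List.reverse_reverse]
  show (((x :: t).zip (fb (x :: t))).foldl bFwdStep ([], none)).1 = _
  simp only [fb, List.zip_cons_cons, List.foldl_cons]
  have h1 : bFwdStep ([], none) (x, t.all (fun y => decide (x < y))) = ([], some x) := by
    simp [bFwdStep]
  rw [h1, fwd_spec]
  simp

-- ===== VERDICT (by name: the statement is the Claim_ definition above) =====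
theorem get_up_point_spec : Claim_equal_get_up_point := by
  intro input_list _ hpre
  unfold Spec_get_up_point
  match input_list with
  | [] => exact absurd rfl hpre
  | x :: t => rw [a_eq_gUp, b_eq_gUp]
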